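-- pv_equiv track=rewrite | github.com/raeez/chiral-bar-cobar | compute/lib/sft_bar_comparison_engine.py | deconcatenation_coproduct
-- ===== SOURCE A (Python) =====
-- from typing import Any, Dict, FrozenSet, List, Optional, Tuple
--
-- def deconcatenation_coproduct(word: Tuple[str, ...]) -> List[Tuple[Tuple[str, ...], Tuple[str, ...]]]:
--     """Compute the deconcatenation coproduct Delta on a bar element.
--
--     For a word [a_1|...|a_n] in the bar complex (= tensor coalgebra),
--     the deconcatenation coproduct is:
--
--         Delta([a_1|...|a_n]) = sum_{i=0}^{n} [a_1|...|a_i] otimes [a_{i+1}|...|a_n]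
--
--     where the i=0 term gives () otimes [a_1|...|a_n] (counit on left)
--     and the i=n term gives [a_1|...|a_n] otimes () (counit on right).
--
--     Returns list of (left_tensor, right_tensor) pairs.
--     Each pair represents one summand of the coproduct.
--
--     Convention: the empty tuple () represents the counit (ground field element).
--     """
--     n = len(word)
--     result = []
--     for i in range(n + 1):
--         left = word[:i]
--         right = word[i:]
--         result.append((left, right))
--     return result
-- ===== SOURCE B (Python) =====
-- def deconcatenation_coproduct(word):
--     """Peel elements off the right end, maintaining the (left, right) split
--     incrementally, collecting pairs back-to-front and reversing once."""
--     out = []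
--     left = word
--     right = ()
--     while True:
--         out.append((left, right))
--         if not left:
--             break
--         right = left[-1:] + right
--         left = left[:-1]
--     out.reverse()
--     return out
-- ===== Notes on version B (the rewrite author's own statement) =====
-- stated objective: alternative
-- what changed: Replaced the index loop that slices the word twice per i with a loop that peels one element off the right end, maintaining the (left, right) split incrementally and building the result back-to-front with one final reverse.
import Mathlib
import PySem

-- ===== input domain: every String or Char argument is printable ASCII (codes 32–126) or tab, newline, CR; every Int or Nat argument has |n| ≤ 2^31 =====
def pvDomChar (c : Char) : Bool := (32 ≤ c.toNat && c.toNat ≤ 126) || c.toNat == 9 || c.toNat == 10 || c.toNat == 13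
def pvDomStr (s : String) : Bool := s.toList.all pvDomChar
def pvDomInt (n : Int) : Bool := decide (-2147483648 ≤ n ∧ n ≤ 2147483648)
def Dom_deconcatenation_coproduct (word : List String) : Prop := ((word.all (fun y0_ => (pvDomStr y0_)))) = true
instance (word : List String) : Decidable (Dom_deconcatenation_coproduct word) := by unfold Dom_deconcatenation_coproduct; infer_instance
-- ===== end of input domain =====

-- B replaces A's index-and-slice loop with an incremental right-peeling loop that builds the result back-to-front (alternative decomposition, same cost).


-- ===== PORT A =====
def deconcatenation_coproduct (word : List String) : List (List String × List String) :=
  let n : Int := word.length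
  (PySem.List.pyRange 0 (n + 1) 1).foldl
    (fun result i =>
      let left := PySem.List.slice word none (some i)
      let right := PySem.List.slice word (some i) none
      result ++ [(left, right)]) []

-- ===== PORT B =====
-- the while-loop of Source B: append (left, right), stop if left is empty, else move the last
-- element of left to the front of right
def decon_alt_loop (left right : List String) (out : List (List String × List String)) :
    List (List String × List String) :=
  let out' := out ++ [(left, right)]
  if _h : left = [] then out'
  else
    decon_alt_loop (PySem.List.slice left none (some (-1)))
      (PySem.List.slice left (some (-1)) none ++ right) out'
termination_by left.length
decreasing_by
  have : left.length ≠ 0 := fun hlen => _h (List.eq_nil_of_length_eq_zero hlen)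
  simp [PySem.List.slice_to_neg_one, List.length_dropLast]
  omega

def deconcatenation_coproduct_alt (word : List String) : List (List String × List String) :=
  (decon_alt_loop word [] []).reverse

-- ===== PRECONDITION & SPEC =====
def Spec_deconcatenation_coproduct (word : List String) (out : List (List String × List String)) : Prop := out = deconcatenation_coproduct_alt word
instance (word : List String) (out : List (List String × List String)) : Decidable (Spec_deconcatenation_coproduct word out) := by unfold Spec_deconcatenation_coproduct; infer_instance

-- ===== CLAIM (what is proved, stated in full; the proofs are below) =====
def Claim_equal_deconcatenation_coproduct : Prop := ∀ (word : List String), Dom_deconcatenation_coproduct word → Spec_deconcatenation_coproduct word (deconcatenation_coproduct word)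

-- ===== LEMMAS AND PROOFS =====
theorem foldl_append_singleton {α β : Type} (f : α → β) (l : List α) (acc : List β) :
    l.foldl (fun r i => r ++ [f i]) acc = acc ++ l.map f := by
  induction l generalizing acc with
  | nil => simp
  | cons x xs ih => simp [List.foldl, ih]

theorem portA_eq_map (word : List String) :
    deconcatenation_coproduct word
      = (List.range (word.length + 1)).map (fun k => (word.take k, word.drop k)) := by
  unfold deconcatenation_coproduct
  rw [show ∀ acc, (PySem.List.pyRange 0 ((word.length : Int) + 1) 1).foldl
        (fun result i => result ++ [(PySem.List.slice word none (some i),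
                                     PySem.List.slice word (some i) none)]) acc
      = acc ++ (PySem.List.pyRange 0 ((word.length : Int) + 1) 1).map
          (fun i => (PySem.List.slice word none (some i), PySem.List.slice word (some i) none))
      from fun acc => foldl_append_singleton _ _ acc]
  rw [PySem.List.pyRange_one]
  simp [List.map_map, Function.comp]

theorem decon_alt_loop_eq (left right : List String) (out : List (List String × List String)) :
    decon_alt_loop left right out
      = out ++ ((List.range (left.length + 1)).map
          (fun k => (left.take k, left.drop k ++ right))).reverse := by
  induction left using List.reverseRecOn generalizing right out with
  | nil => simp [decon_alt_loop]
  | append_singleton xs x ih =>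
    rw [decon_alt_loop]
    have hne : xs ++ [x] ≠ [] := by simp
    rw [dif_neg hne]
    rw [PySem.List.slice_to_neg_one, PySem.List.slice_from_neg_one]
    simp only [List.dropLast_concat, List.length_append, List.length_singleton,
      Nat.add_sub_cancel, List.drop_left]
    rw [ih]
    conv_rhs => rw [List.range_succ]
    simp only [List.map_append, List.reverse_append, List.map_cons, List.map_nil,
      List.reverse_cons, List.reverse_nil, List.nil_append, List.singleton_append]
    rw [List.take_of_length_le (by simp), List.drop_of_length_le (by simp)]
    simp only [List.nil_append, List.append_assoc, List.cons_append, List.nil_append]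
    congr 2
    congr 1
    apply List.map_congr_left
    intro k hk
    rw [List.mem_range] at hk
    rw [List.take_append_of_le_length (by omega), List.drop_append_of_le_length (by omega)]
    simp

theorem portB_eq_map (word : List String) :
    deconcatenation_coproduct_alt word
      = (List.range (word.length + 1)).map (fun k => (word.take k, word.drop k)) := by
  unfold deconcatenation_coproduct_alt
  rw [decon_alt_loop_eq]
  simp

-- ===== VERDICT (by name: the statement is the Claim_ definition above) =====
theorem deconcatenation_coproduct_spec : Claim_equal_deconcatenation_coproduct := by
  intro word _
  unfold Spec_deconcatenation_coproduct
  rw [portA_eq_map, portB_eq_map]
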